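-- pv_equiv track=rewrite | github.com/consigcody94/genesis-protocol | torah_hash.py | torah_hash
-- ===== SOURCE A (Python) =====
-- def torah_hash(text):
--     """
--     A novel hashing utility inspired by Gematria.
--     Concept:
--     - Map each char to an index (1-26 for English).
--     - Use weights based on 'Potency' (similar to 10^n in decimal, but maybe prime based?).
--     - Add a 'skip' factor (ELS influence).
--     """
--     hash_val = 0
--     skip = 0
--     # English Gematria mapping (a=1, b=2... z=26)
--     # But heavily weighted by position (like base-27)
--
--     for i, char in enumerate(text):
--         ascii_val = ord(char)
--         # 1-26 mapping roughly
--         val = (ascii_val - 96) if 'a' <= char <= 'z' else ascii_val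
--
--         # The "Torah" twist:
--         # 1. Use the Gematria 'Triangular' property? (Traffic = 1+2+3..n) - No, too slow.
--         # 2. Weight by position (i+1) * Value.
--         # 3. Add a specialized "salt" based on text length (Kabbalistic significance of numbers?).
--
--         weight = (i + 1) * 7 # 7 is a significant number in Torah
--         hash_val += (val * weight)
--
--         # ELS-inspired: Add value of character 'skip' steps away?
--         # Too complex for simple checksum.
--
--     # Modulo to keep it within standard integer range (32-bitish)
--     return hash_val % 4294967296
-- ===== SOURCE B (Python) =====
-- def torah_hash(text):
--     # Suffix-sum decomposition: sum_i (i+1)*val_i == sum of suffix sums.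
--     total = 0
--     s = 0
--     for char in reversed(text):
--         ascii_val = ord(char)
--         s += (ascii_val - 96) if 'a' <= char <= 'z' else ascii_val
--         total += s
--     return (7 * total) % 4294967296
-- ===== Notes on version B (the rewrite author's own statement) =====
-- stated objective: alternative
-- what changed: Replaces the enumerate-based weighted sum (i+1)*7*val with a reverse pass keeping a running suffix sum (no index arithmetic), multiplying by 7 once at the end before the modulo.
import Mathlib
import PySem

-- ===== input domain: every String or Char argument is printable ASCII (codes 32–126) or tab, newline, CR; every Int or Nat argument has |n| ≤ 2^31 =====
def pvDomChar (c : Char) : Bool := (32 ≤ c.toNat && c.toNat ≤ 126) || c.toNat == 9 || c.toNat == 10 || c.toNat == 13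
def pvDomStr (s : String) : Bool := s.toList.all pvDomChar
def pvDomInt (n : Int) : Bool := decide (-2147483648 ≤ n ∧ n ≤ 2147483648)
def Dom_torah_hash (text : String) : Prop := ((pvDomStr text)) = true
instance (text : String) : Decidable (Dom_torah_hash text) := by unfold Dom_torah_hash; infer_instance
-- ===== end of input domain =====

-- B replaces the enumerate-indexed weighted sum with a reverse pass over running suffix sums (no per-character index arithmetic); same value, same cost.


-- ===== PORT A =====
def torah_hash (text : String) : Int :=
  let hash_val : Int := (PySem.List.enumerate text.toList).foldl
    (fun hash_val ic =>
      let ascii_val : Int := ic.2.toNat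
      let val : Int := if 'a' ≤ ic.2 ∧ ic.2 ≤ 'z' then ascii_val - 96 else ascii_val
      let weight : Int := (ic.1 + 1) * 7
      hash_val + val * weight) 0
  PySem.Int.mod hash_val 4294967296

-- ===== PORT B =====
def torah_hash_alt (text : String) : Int :=
  let st : Int × Int := text.toList.reverse.foldl
    (fun (st : Int × Int) c =>
      let ascii_val : Int := c.toNat
      let s := st.1 + (if 'a' ≤ c ∧ c ≤ 'z' then ascii_val - 96 else ascii_val)
      (s, st.2 + s)) (0, 0)
  PySem.Int.mod (7 * st.2) 4294967296

-- ===== PRECONDITION & SPEC =====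
def Spec_torah_hash (text : String) (out : Int) : Prop := out = torah_hash_alt text
instance (text : String) (out : Int) : Decidable (Spec_torah_hash text out) := by unfold Spec_torah_hash; infer_instance

-- ===== CLAIM (what is proved, stated in full; the proofs are below) =====
def Claim_equal_torah_hash : Prop := ∀ (text : String), Dom_torah_hash text → Spec_torah_hash text (torah_hash text)

-- ===== LEMMAS AND PROOFS =====
-- character value as both Pythons map it
def pvVal (c : Char) : Int := if 'a' ≤ c ∧ c ≤ 'z' then (c.toNat : Int) - 96 else (c.toNat : Int)

-- plain sum of values
def pvS (l : List Char) : Int := (l.map pvVal).sum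

-- position-weighted sum: Σ (i+1) * val_i
def pvW : List Char → Int
  | [] => 0
  | c :: l => pvVal c + pvW l + pvS l

theorem pvA_fold (l : List Char) : ∀ (k : Int) (acc : Int),
    (PySem.List.enumerate l k).foldl
      (fun hash_val ic =>
        let ascii_val : Int := ic.2.toNat
        let val : Int := if 'a' ≤ ic.2 ∧ ic.2 ≤ 'z' then ascii_val - 96 else ascii_val
        let weight : Int := (ic.1 + 1) * 7
        hash_val + val * weight) acc
      = acc + 7 * (pvW l + k * pvS l) := by
  induction l with
  | nil => intro k acc; simp [PySem.List.enumerate, pvW, pvS]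
  | cons c t ih =>
    intro k acc
    simp only [PySem.List.enumerate, List.foldl_cons, ih, pvW, pvS, List.map_cons, List.sum_cons,
      pvVal]
    ring

theorem pvB_fold (l : List Char) :
    l.foldr
      (fun c (st : Int × Int) =>
        let ascii_val : Int := c.toNat
        let s := st.1 + (if 'a' ≤ c ∧ c ≤ 'z' then ascii_val - 96 else ascii_val)
        (s, st.2 + s)) (0, 0)
      = (pvS l, pvW l) := by
  induction l with
  | nil => simp [pvS, pvW]
  | cons c t ih =>
    simp only [List.foldr_cons, ih, pvS, pvW, List.map_cons, List.sum_cons, pvVal]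
    exact Prod.ext (by ring) (by ring)


-- ===== VERDICT (by name: the statement is the Claim_ definition above) =====
theorem torah_hash_spec : Claim_equal_torah_hash := by
  intro text _
  unfold Spec_torah_hash torah_hash torah_hash_alt
  rw [List.foldl_reverse]
  have hB := pvB_fold text.toList
  have hA := pvA_fold text.toList 0 0
  simp only [] at hA hB ⊢
  rw [hA, hB]
  norm_num
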